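-- pv_equiv track=rewrite | github.com/Ragulio/Reducer | reducer2_2.py | first_hit
-- ===== SOURCE A (Python) =====
-- def first_hit(formula,names):
--     first_hits = {}
--     for name in names:
--         if name in formula:
--             name_hit = formula.index(name)
--             first_hits[name_hit] = name
--     the_first = min(first_hits.keys())
--     return first_hits[the_first]
-- ===== SOURCE B (Python) =====
-- def first_hit(formula, names):
--     best_index = None
--     best_name = None
--     for name in names:
--         if name in formula:
--             i = formula.index(name)
--             if best_index is None or i <= best_index:
--                 best_index = i
--                 best_name = name
--     if best_index is None:
--         raise ValueError("no name occurs in formula")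
--     return best_name
-- ===== Notes on version B (the rewrite author's own statement) =====
-- stated objective: simpler
-- what changed: Replaces A's index-to-name dict plus min-over-keys by a single pass that keeps the best (index, name) pair, updating on <= so the last name at an equal index wins like A's dict overwrite; raises ValueError when no name matches, exactly where A's min([]) does.
import Mathlib
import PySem

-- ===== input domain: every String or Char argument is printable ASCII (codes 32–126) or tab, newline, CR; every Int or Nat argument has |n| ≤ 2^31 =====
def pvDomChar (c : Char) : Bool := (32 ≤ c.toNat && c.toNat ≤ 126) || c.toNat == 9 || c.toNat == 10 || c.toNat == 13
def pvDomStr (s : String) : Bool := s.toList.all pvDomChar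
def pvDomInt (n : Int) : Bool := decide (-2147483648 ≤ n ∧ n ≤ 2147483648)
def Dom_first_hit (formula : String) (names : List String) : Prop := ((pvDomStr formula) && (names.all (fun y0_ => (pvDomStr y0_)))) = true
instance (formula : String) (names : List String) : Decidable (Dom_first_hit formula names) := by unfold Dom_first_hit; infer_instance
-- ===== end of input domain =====

-- B replaces A's index→name dict plus min-over-keys by a single pass keeping the best (index, name); same return value, raises ValueError like A when no name occurs.


-- ===== PORT A =====
-- builds first_hits : dict index → name, then min of keys; Python's min([]) (ValueError) is the
-- 'none' branch, excluded by Pre_first_hit.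
def first_hit (formula : String) (names : List String) : String :=
  let first_hits : PySem.Dict Int String :=
    names.foldl (fun d name =>
      if PySem.Str.isIn name formula then
        d.insert (PySem.Str.find formula name) name
      else d) PySem.Dict.empty
  match PySem.List.min? first_hits.keys (fun x => x) with
  | some the_first => (first_hits.get? the_first).getD ""
  | none => ""

-- ===== PORT B =====
-- single pass keeping the best (index, name); '≤' so the last name at an equal index wins.
-- Python B raises ValueError in the 'none' branch, excluded by Pre_first_hit.
def first_hit_alt (formula : String) (names : List String) : String :=
  let best : Option (Int × String) :=
    names.foldl (fun best name =>
      if PySem.Str.isIn name formula then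
        let i := PySem.Str.find formula name
        match best with
        | none => some (i, name)
        | some (bi, _) => if i ≤ bi then some (i, name) else best
      else best) none
  match best with
  | some (_, n) => n
  | none => ""

-- ===== PRECONDITION & SPEC =====
-- Pre_ excludes exactly the inputs where both Pythons raise ValueError: no name occurs in formula.
def Pre_first_hit (formula : String) (names : List String) : Prop :=
  names.any (fun n => PySem.Str.isIn n formula) = true
instance (formula : String) (names : List String) : Decidable (Pre_first_hit formula names) := by
  unfold Pre_first_hit; infer_instance
def pvWitness_first_hit : String × List String := ("x+y", ["y", "x"])

def Spec_first_hit (formula : String) (names : List String) (out : String) : Prop := out = first_hit_alt formula names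
instance (formula : String) (names : List String) (out : String) : Decidable (Spec_first_hit formula names out) := by unfold Spec_first_hit; infer_instance

-- ===== CLAIM (what is proved, stated in full; the proofs are below) =====
def Claim_equal_first_hit : Prop := ∀ (formula : String) (names : List String), Dom_first_hit formula names → Pre_first_hit formula names → Spec_first_hit formula names (first_hit formula names)

-- ===== LEMMAS AND PROOFS =====

-- proof-only names for the two loop bodies (definitionally the lambdas in the ports)
def pvStepA (formula : String) (d : PySem.Dict Int String) (name : String) : PySem.Dict Int String :=
  if PySem.Str.isIn name formula then
    d.insert (PySem.Str.find formula name) name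
  else d

def pvStepB (formula : String) (b : Option (Int × String)) (name : String) : Option (Int × String) :=
  if PySem.Str.isIn name formula then
    let i := PySem.Str.find formula name
    match b with
    | none => some (i, name)
    | some (bi, _) => if i ≤ bi then some (i, name) else b
  else b

-- the loop invariant tying A's dict to B's best pair
def pvInv (d : PySem.Dict Int String) (b : Option (Int × String)) : Prop :=
  (b = none ∧ d.keys = []) ∨
  ∃ i n, b = some (i, n) ∧ d.get? i = some n ∧ i ∈ d.keys ∧ ∀ k ∈ d.keys, i ≤ k

lemma pvInv_step (formula name : String) (d : PySem.Dict Int String)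
    (b : Option (Int × String)) (h : pvInv d b) :
    pvInv (pvStepA formula d name) (pvStepB formula b name) := by
  unfold pvStepA pvStepB
  by_cases hin : PySem.Str.isIn name formula
  · simp only [hin, if_true]
    set j := PySem.Str.find formula name with hj
    rcases h with ⟨hb, hk⟩ | ⟨i, n, hb, hget, hmem, hle⟩
    · subst hb
      refine Or.inr ⟨j, name, rfl, PySem.Dict.get?_insert_self d j name, ?_, ?_⟩
      · exact (PySem.Dict.mem_keys_insert _ _ _ _).mpr (Or.inl rfl)
      · intro k hkmem
        rcases (PySem.Dict.mem_keys_insert _ _ _ _).mp hkmem with h1 | h1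
        · omega
        · simp [hk] at h1
    · subst hb
      by_cases hle2 : j ≤ i
      · simp only [hle2, if_true]
        refine Or.inr ⟨j, name, rfl, PySem.Dict.get?_insert_self d j name, ?_, ?_⟩
        · exact (PySem.Dict.mem_keys_insert _ _ _ _).mpr (Or.inl rfl)
        · intro k hkmem
          rcases (PySem.Dict.mem_keys_insert _ _ _ _).mp hkmem with h1 | h1
          · omega
          · exact le_trans hle2 (hle k h1)
      · simp only [hle2, if_false]
        refine Or.inr ⟨i, n, rfl, ?_, ?_, ?_⟩
        · rw [PySem.Dict.get?_insert_of_ne d name (by omega)]; exact hget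
        · exact (PySem.Dict.mem_keys_insert _ _ _ _).mpr (Or.inr hmem)
        · intro k hkmem
          rcases (PySem.Dict.mem_keys_insert _ _ _ _).mp hkmem with h1 | h1
          · omega
          · exact hle k h1
  · simp only [hin]
    exact h

lemma pvLoop_agree (formula : String) (names : List String)
    (d : PySem.Dict Int String) (b : Option (Int × String)) (h : pvInv d b) :
    (match PySem.List.min? (names.foldl (pvStepA formula) d).keys (fun x => x) with
     | some the_first => ((names.foldl (pvStepA formula) d).get? the_first).getD ""
     | none => "")
    =
    (match names.foldl (pvStepB formula) b with
     | some (_, n) => n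
     | none => "") := by
  induction names generalizing d b with
  | nil =>
    simp only [List.foldl_nil]
    rcases h with ⟨hb, hk⟩ | ⟨i, n, hb, hget, hmem, hle⟩
    · subst hb; rw [hk]
      simp [PySem.List.min?]
    · subst hb
      have hne : d.keys ≠ [] := List.ne_nil_of_mem hmem
      cases hmin : PySem.List.min? d.keys (fun x => x) with
      | none => exact absurd ((PySem.List.min?_eq_none_iff _ _).mp hmin) hne
      | some m =>
        have h1 : m ≤ i := PySem.List.min?_isMin hmin i hmem
        have h2 : i ≤ m := hle m (PySem.List.min?_mem hmin)
        have : m = i := le_antisymm h1 h2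
        subst this
        simp [hget]
  | cons name rest ih =>
    simp only [List.foldl_cons]
    exact ih _ _ (pvInv_step formula name d b h)

-- ===== VERDICT (by name: the statement is the Claim_ definition above) =====
theorem first_hit_spec : Claim_equal_first_hit := by
  intro formula names _ _
  unfold Spec_first_hit first_hit first_hit_alt
  exact pvLoop_agree formula names PySem.Dict.empty none (Or.inl ⟨rfl, rfl⟩)
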